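-- pv_equiv track=rewrite | github.com/GabrielReira/Computer-Science-USP | Parte 2/Semana 6/elefantes.py | elefantes
-- ===== SOURCE A (Python) =====
-- def incomodam(n):
--   if n <= 0:
--     return ''
--   return 'incomodam ' + incomodam(n-1)
--
-- def elefantes(n):
--   def frase(n):
--     return f'\n{n} elefantes {incomodam(n)}muito mais\n{n} elefantes incomodam muita gente'
--
--   if n <= 0:
--     return ''
--   if n == 1:
--     return 'Um elefante incomoda muita gente'
--   return elefantes(n-1) + frase(n)
-- ===== SOURCE B (Python) =====
-- def elefantes(n):
--   if n <= 0:
--     return ''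
--   parts = ['Um elefante incomoda muita gente']
--   for i in range(2, n + 1):
--     parts.append(f'\n{i} elefantes ' + 'incomodam ' * i
--                  + f'muito mais\n{i} elefantes incomodam muita gente')
--   return ''.join(parts)
-- ===== Notes on version B (the rewrite author's own statement) =====
-- stated objective: faster
-- what changed: Replaced the double recursion (elefantes recursing on n-1 plus a recursive incomodam per verse) by a single forward loop over 2..n that appends each verse, built with string repetition, into a list joined once.
import Mathlib
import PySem

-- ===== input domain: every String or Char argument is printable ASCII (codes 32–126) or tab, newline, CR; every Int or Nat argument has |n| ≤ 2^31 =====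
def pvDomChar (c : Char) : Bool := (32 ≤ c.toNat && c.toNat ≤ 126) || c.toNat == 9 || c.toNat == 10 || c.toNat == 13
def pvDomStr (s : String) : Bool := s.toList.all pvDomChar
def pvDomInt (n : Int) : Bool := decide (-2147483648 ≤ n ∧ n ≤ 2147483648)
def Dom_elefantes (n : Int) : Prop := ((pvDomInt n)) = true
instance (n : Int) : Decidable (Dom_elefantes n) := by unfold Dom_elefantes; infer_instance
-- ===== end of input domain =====

-- B replaces A's double recursion by one forward loop over 2..n building verses with string repetition, joined once (faster constant factor).

-- ===== PORT A =====
def incomodamA (n : Int) : String :=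
  if n ≤ 0 then "" else "incomodam " ++ incomodamA (n - 1)
termination_by n.toNat
decreasing_by omega

def fraseA (n : Int) : String :=
  "\n" ++ PySem.Int.toStr n ++ " elefantes " ++ incomodamA n ++ "muito mais\n"
    ++ PySem.Int.toStr n ++ " elefantes incomodam muita gente"

def elefantes (n : Int) : String :=
  if n ≤ 0 then ""
  else if n = 1 then "Um elefante incomoda muita gente"
  else elefantes (n - 1) ++ fraseA n
termination_by n.toNat
decreasing_by omega

-- ===== PORT B =====
-- 'incomodam ' * i
def verseB (i : Int) : String :=
  "\n" ++ PySem.Int.toStr i ++ " elefantes "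
    ++ String.join (List.replicate i.toNat "incomodam ")
    ++ "muito mais\n" ++ PySem.Int.toStr i ++ " elefantes incomodam muita gente"

def elefantes_alt (n : Int) : String :=
  if n ≤ 0 then ""
  else
    String.join (["Um elefante incomoda muita gente"]
      ++ (PySem.List.pyRange 2 (n + 1) 1).map verseB)

-- ===== PRECONDITION & SPEC =====
-- Pre_ excludes exactly the inputs where A RAISES: for n > 995 A's n-deep recursion
-- exceeds CPython's default recursion limit and raises RecursionError.
def Pre_elefantes (n : Int) : Prop := n ≤ 995
instance (n : Int) : Decidable (Pre_elefantes n) := by unfold Pre_elefantes; infer_instance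
def pvWitness_elefantes : Int := (3)

def Spec_elefantes (n : Int) (out : String) : Prop := out = elefantes_alt n
instance (n : Int) (out : String) : Decidable (Spec_elefantes n out) := by unfold Spec_elefantes; infer_instance

-- ===== CLAIM (what is proved, stated in full; the proofs are below) =====
def Claim_equal_elefantes : Prop := ∀ (n : Int), Dom_elefantes n → Pre_elefantes n → Spec_elefantes n (elefantes n)

-- ===== LEMMAS AND PROOFS =====
theorem str_foldl_shift (l : List String) (x : String) :
    List.foldl (fun r s => r ++ s) x l = x ++ List.foldl (fun r s => r ++ s) "" l := by
  induction l generalizing x with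
  | nil => simp
  | cons b t ih => rw [List.foldl_cons, List.foldl_cons, ih (x ++ b), ih ("" ++ b)]
                   simp [String.append_assoc]

theorem join_nil : String.join ([] : List String) = "" := rfl

theorem join_cons (a : String) (l : List String) :
    String.join (a :: l) = a ++ String.join l := by
  show List.foldl (fun r s => r ++ s) "" (a :: l) = a ++ List.foldl (fun r s => r ++ s) "" l
  rw [List.foldl_cons, str_foldl_shift l ("" ++ a)]
  simp

theorem incomodam_eq (n : Int) :
    incomodamA n = String.join (List.replicate n.toNat "incomodam ") := by
  by_cases h : n ≤ 0
  · rw [incomodamA]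
    simp [h, Int.toNat_of_nonpos h, String.join]
  · rw [incomodamA]
    have h1 : n.toNat = (n - 1).toNat + 1 := by omega
    rw [if_neg h, incomodam_eq (n - 1), h1, List.replicate_succ, join_cons]
termination_by n.toNat
decreasing_by omega

theorem frase_eq (n : Int) : fraseA n = verseB n := by
  unfold fraseA verseB
  rw [incomodam_eq]

theorem join_append (xs ys : List String) :
    String.join (xs ++ ys) = String.join xs ++ String.join ys := by
  induction xs with
  | nil => rw [List.nil_append]
           show _ = List.foldl (fun r s => r ++ s) "" [] ++ _
           simp
  | cons a t ih => rw [List.cons_append, join_cons, join_cons, ih, String.append_assoc]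

theorem elefantes_eq (n : Int) : elefantes n = elefantes_alt n := by
  by_cases h0 : n ≤ 0
  · rw [elefantes, elefantes_alt]; simp [h0]
  · by_cases h1 : n = 1
    · subst h1
      rw [elefantes, elefantes_alt]
      rw [PySem.List.pyRange_one_eq_nil (by norm_num)]
      simp [join_cons, join_nil]
    · rw [elefantes, elefantes_alt, if_neg h0, if_neg h1, if_neg h0,
        elefantes_eq (n - 1)]
      rw [elefantes_alt, if_neg (by omega : ¬ n - 1 ≤ 0)]
      have : PySem.List.pyRange 2 (n + 1) 1
          = PySem.List.pyRange 2 (n - 1 + 1) 1 ++ [n] := by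
        have := PySem.List.pyRange_one_succ_right (a := 2) (b := n) (by omega)
        simpa using this
      rw [this]
      simp [join_append, join_cons, join_nil, frase_eq, String.append_assoc]
termination_by n.toNat
decreasing_by omega

-- ===== VERDICT (by name: the statement is the Claim_ definition above) =====
theorem elefantes_spec : Claim_equal_elefantes := by
  intro n _ _
  unfold Spec_elefantes
  exact elefantes_eq n
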